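-- pv_equiv track=rewrite | github.com/stefm78/learn-it | tmp/analyze_scope_alignment.py | assess_scope_alignment
-- ===== SOURCE A (Python) =====
-- from typing import Any
--
-- def assess_scope_alignment(
--     scope: str,
--     owned_node_ids: list[str],
--     cluster_views: list[dict[str, Any]],
-- ) -> tuple[str, list[str]]:
--     findings: list[str] = []
--
--     if not owned_node_ids:
--         return "empty_scope", ["No owned node found for this scope."]
--
--     if not cluster_views:
--         return "not_covered_by_selected_clusters", [
--             "Owned nodes exist but are not covered by selected closure clusters."
--         ]
--
--     multi_owner = [
--         item for item in cluster_views
--         if item.get("owner_status") == "multi_owner_fragmented"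
--     ]
--     high_boundary = [
--         item for item in cluster_views
--         if item.get("boundary_pressure") == "high"
--     ]
--     neighbor_review = [
--         item for item in cluster_views
--         if item.get("recommendation") == "declare_or_review_neighbors"
--     ]
--     unowned_mix = [
--         item for item in cluster_views
--         if item.get("owner_status") == "single_owner_plus_unowned"
--     ]
--
--     if multi_owner:
--         findings.append(
--             f"{len(multi_owner)} cluster(s) mix this scope with other owned scopes."
--         )
--
--     if high_boundary:
--         findings.append(
--             f"{len(high_boundary)} cluster(s) have high boundary pressure."
--         )
--
--     if neighbor_review:
--         findings.append(
--             f"{len(neighbor_review)} cluster(s) suggest neighbor review."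
--         )
--
--     if unowned_mix:
--         findings.append(
--             f"{len(unowned_mix)} cluster(s) mix owned nodes with currently UNOWNED nodes."
--         )
--
--     if len(cluster_views) >= 5:
--         findings.append(
--             f"Owned nodes are spread across {len(cluster_views)} selected clusters."
--         )
--
--     if multi_owner:
--         return "split_merge_or_bridge_review", findings
--
--     if high_boundary or neighbor_review:
--         return "requires_neighbor_review", findings
--
--     if unowned_mix:
--         return "requires_unowned_classification", findings
--
--     if len(cluster_views) >= 5:
--         return "possibly_fragmented", findings
--
--     return "stable_or_minor_review", findings or ["No major alignment issue detected."]
-- ===== SOURCE B (Python) =====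
-- def assess_scope_alignment(scope, owned_node_ids, cluster_views):
--     if not owned_node_ids:
--         return "empty_scope", ["No owned node found for this scope."]
--
--     if not cluster_views:
--         return "not_covered_by_selected_clusters", [
--             "Owned nodes exist but are not covered by selected closure clusters."
--         ]
--
--     multi_owner = high_boundary = neighbor_review = unowned_mix = 0
--     for item in cluster_views:
--         status = item.get("owner_status")
--         if status == "multi_owner_fragmented":
--             multi_owner += 1
--         elif status == "single_owner_plus_unowned":
--             unowned_mix += 1
--         if item.get("boundary_pressure") == "high":
--             high_boundary += 1
--         if item.get("recommendation") == "declare_or_review_neighbors":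
--             neighbor_review += 1
--
--     findings = []
--     if multi_owner:
--         findings.append(f"{multi_owner} cluster(s) mix this scope with other owned scopes.")
--     if high_boundary:
--         findings.append(f"{high_boundary} cluster(s) have high boundary pressure.")
--     if neighbor_review:
--         findings.append(f"{neighbor_review} cluster(s) suggest neighbor review.")
--     if unowned_mix:
--         findings.append(f"{unowned_mix} cluster(s) mix owned nodes with currently UNOWNED nodes.")
--     spread = len(cluster_views) >= 5
--     if spread:
--         findings.append(f"Owned nodes are spread across {len(cluster_views)} selected clusters.")
--
--     if multi_owner:
--         return "split_merge_or_bridge_review", findings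
--     if high_boundary or neighbor_review:
--         return "requires_neighbor_review", findings
--     if unowned_mix:
--         return "requires_unowned_classification", findings
--     if spread:
--         return "possibly_fragmented", findings
--     return "stable_or_minor_review", findings or ["No major alignment issue detected."]
-- ===== Notes on version B (the rewrite author's own statement) =====
-- stated objective: simpler
-- what changed: Replaces the four separate list-comprehension passes (each materialising a filtered list only used for its length/truthiness) with one pass over cluster_views maintaining four integer counters, then emits the same findings and classification from the counters.
import Mathlib
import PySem

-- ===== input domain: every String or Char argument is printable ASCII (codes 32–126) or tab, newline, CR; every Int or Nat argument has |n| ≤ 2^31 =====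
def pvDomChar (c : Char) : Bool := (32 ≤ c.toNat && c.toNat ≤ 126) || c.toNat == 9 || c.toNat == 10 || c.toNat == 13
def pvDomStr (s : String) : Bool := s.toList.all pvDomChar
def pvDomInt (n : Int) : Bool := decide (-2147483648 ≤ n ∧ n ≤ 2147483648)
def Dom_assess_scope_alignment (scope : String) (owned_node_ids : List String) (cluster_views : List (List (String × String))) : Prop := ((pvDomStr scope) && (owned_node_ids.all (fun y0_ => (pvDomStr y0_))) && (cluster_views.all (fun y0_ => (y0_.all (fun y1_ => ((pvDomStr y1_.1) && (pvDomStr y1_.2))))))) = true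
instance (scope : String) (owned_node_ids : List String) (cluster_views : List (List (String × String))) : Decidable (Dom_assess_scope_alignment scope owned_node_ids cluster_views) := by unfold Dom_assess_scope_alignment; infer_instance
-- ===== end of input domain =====

-- B replaces A's four filtering list comprehensions by a single counting pass (objective: simpler).

-- item.get(k): first-match lookup in the association list (shared by both ports)
def pvGet (item : List (String × String)) (k : String) : Option String :=
  PySem.Dict.get? (PySem.Dict.mk item) k

-- ===== PORT A =====
def assess_scope_alignment (scope : String) (owned_node_ids : List String) (cluster_views : List (List (String × String))) : String × List String :=
  if owned_node_ids = [] then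
    ("empty_scope", ["No owned node found for this scope."])
  else if cluster_views = [] then
    ("not_covered_by_selected_clusters",
      ["Owned nodes exist but are not covered by selected closure clusters."])
  else
    let multi_owner := cluster_views.filter (fun item => pvGet item "owner_status" == some "multi_owner_fragmented")
    let high_boundary := cluster_views.filter (fun item => pvGet item "boundary_pressure" == some "high")
    let neighbor_review := cluster_views.filter (fun item => pvGet item "recommendation" == some "declare_or_review_neighbors")
    let unowned_mix := cluster_views.filter (fun item => pvGet item "owner_status" == some "single_owner_plus_unowned")
    let findings : List String :=
      (if multi_owner ≠ [] then [PySem.Int.toStr (multi_owner.length : Int) ++ " cluster(s) mix this scope with other owned scopes."] else []) ++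
      (if high_boundary ≠ [] then [PySem.Int.toStr (high_boundary.length : Int) ++ " cluster(s) have high boundary pressure."] else []) ++
      (if neighbor_review ≠ [] then [PySem.Int.toStr (neighbor_review.length : Int) ++ " cluster(s) suggest neighbor review."] else []) ++
      (if unowned_mix ≠ [] then [PySem.Int.toStr (unowned_mix.length : Int) ++ " cluster(s) mix owned nodes with currently UNOWNED nodes."] else []) ++
      (if 5 ≤ cluster_views.length then ["Owned nodes are spread across " ++ PySem.Int.toStr (cluster_views.length : Int) ++ " selected clusters."] else [])
    if multi_owner ≠ [] then ("split_merge_or_bridge_review", findings)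
    else if high_boundary ≠ [] ∨ neighbor_review ≠ [] then ("requires_neighbor_review", findings)
    else if unowned_mix ≠ [] then ("requires_unowned_classification", findings)
    else if 5 ≤ cluster_views.length then ("possibly_fragmented", findings)
    else ("stable_or_minor_review", if findings = [] then ["No major alignment issue detected."] else findings)

-- ===== PORT B =====
-- the single counting pass of Source B: (multi_owner, high_boundary, neighbor_review, unowned_mix)
def pvCounts (cluster_views : List (List (String × String))) : Int × Int × Int × Int :=
  cluster_views.foldl (fun acc item =>
    let status := pvGet item "owner_status"
    let mu : Int × Int :=
      if status == some "multi_owner_fragmented" then (acc.1 + 1, acc.2.2.2)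
      else if status == some "single_owner_plus_unowned" then (acc.1, acc.2.2.2 + 1)
      else (acc.1, acc.2.2.2)
    let h := if pvGet item "boundary_pressure" == some "high" then acc.2.1 + 1 else acc.2.1
    let n := if pvGet item "recommendation" == some "declare_or_review_neighbors" then acc.2.2.1 + 1 else acc.2.2.1
    (mu.1, h, n, mu.2)) (0, 0, 0, 0)

def assess_scope_alignment_alt (scope : String) (owned_node_ids : List String) (cluster_views : List (List (String × String))) : String × List String :=
  if owned_node_ids = [] then
    ("empty_scope", ["No owned node found for this scope."])
  else if cluster_views = [] then
    ("not_covered_by_selected_clusters",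
      ["Owned nodes exist but are not covered by selected closure clusters."])
  else
    let c := pvCounts cluster_views
    let findings : List String :=
      (if 0 < c.1 then [PySem.Int.toStr c.1 ++ " cluster(s) mix this scope with other owned scopes."] else []) ++
      (if 0 < c.2.1 then [PySem.Int.toStr c.2.1 ++ " cluster(s) have high boundary pressure."] else []) ++
      (if 0 < c.2.2.1 then [PySem.Int.toStr c.2.2.1 ++ " cluster(s) suggest neighbor review."] else []) ++
      (if 0 < c.2.2.2 then [PySem.Int.toStr c.2.2.2 ++ " cluster(s) mix owned nodes with currently UNOWNED nodes."] else []) ++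
      (if 5 ≤ cluster_views.length then ["Owned nodes are spread across " ++ PySem.Int.toStr (cluster_views.length : Int) ++ " selected clusters."] else [])
    if 0 < c.1 then ("split_merge_or_bridge_review", findings)
    else if 0 < c.2.1 ∨ 0 < c.2.2.1 then ("requires_neighbor_review", findings)
    else if 0 < c.2.2.2 then ("requires_unowned_classification", findings)
    else if 5 ≤ cluster_views.length then ("possibly_fragmented", findings)
    else ("stable_or_minor_review", if findings = [] then ["No major alignment issue detected."] else findings)

-- ===== PRECONDITION & SPEC =====
def Spec_assess_scope_alignment (scope : String) (owned_node_ids : List String) (cluster_views : List (List (String × String))) (out : String × List String) : Prop := out = assess_scope_alignment_alt scope owned_node_ids cluster_views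
instance (scope : String) (owned_node_ids : List String) (cluster_views : List (List (String × String))) (out : String × List String) : Decidable (Spec_assess_scope_alignment scope owned_node_ids cluster_views out) := by unfold Spec_assess_scope_alignment; infer_instance

-- ===== CLAIM (what is proved, stated in full; the proofs are below) =====
def Claim_equal_assess_scope_alignment : Prop := ∀ (scope : String) (owned_node_ids : List String) (cluster_views : List (List (String × String))), Dom_assess_scope_alignment scope owned_node_ids cluster_views → Spec_assess_scope_alignment scope owned_node_ids cluster_views (assess_scope_alignment scope owned_node_ids cluster_views)

-- ===== LEMMAS AND PROOFS =====

set_option maxHeartbeats 1000000 in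
theorem pvCounts_go (cvs : List (List (String × String))) (m h n u : Int) :
    cvs.foldl (fun acc item =>
      let status := pvGet item "owner_status"
      let mu : Int × Int :=
        if status == some "multi_owner_fragmented" then (acc.1 + 1, acc.2.2.2)
        else if status == some "single_owner_plus_unowned" then (acc.1, acc.2.2.2 + 1)
        else (acc.1, acc.2.2.2)
      let h := if pvGet item "boundary_pressure" == some "high" then acc.2.1 + 1 else acc.2.1
      let n := if pvGet item "recommendation" == some "declare_or_review_neighbors" then acc.2.2.1 + 1 else acc.2.2.1
      (mu.1, h, n, mu.2)) (m, h, n, u) =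
    (m + (cvs.countP (fun item => pvGet item "owner_status" == some "multi_owner_fragmented") : Int),
     h + (cvs.countP (fun item => pvGet item "boundary_pressure" == some "high") : Int),
     n + (cvs.countP (fun item => pvGet item "recommendation" == some "declare_or_review_neighbors") : Int),
     u + (cvs.countP (fun item => pvGet item "owner_status" == some "single_owner_plus_unowned") : Int)) := by
  induction cvs generalizing m h n u with
  | nil => simp [List.countP]
  | cons x xs ih =>
    simp only [List.foldl_cons, List.countP_cons]
    rw [ih]
    by_cases h1 : (pvGet x "owner_status" == some "multi_owner_fragmented") = true <;>
    by_cases h2 : (pvGet x "owner_status" == some "single_owner_plus_unowned") = true <;>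
    by_cases h3 : (pvGet x "boundary_pressure" == some "high") = true <;>
    by_cases h4 : (pvGet x "recommendation" == some "declare_or_review_neighbors") = true <;>
      first
      | (exfalso
         have e1 := eq_of_beq h1
         have e2 := eq_of_beq h2
         rw [e1] at e2
         simp at e2)
      | (simp only [h1, h2, h3, h4, Bool.false_eq_true, if_true, if_false,
           Prod.mk.injEq]
         push_cast
         omega)

theorem pvCounts_eq (cvs : List (List (String × String))) :
    pvCounts cvs =
    ((cvs.countP (fun item => pvGet item "owner_status" == some "multi_owner_fragmented") : Int),
     (cvs.countP (fun item => pvGet item "boundary_pressure" == some "high") : Int),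
     (cvs.countP (fun item => pvGet item "recommendation" == some "declare_or_review_neighbors") : Int),
     (cvs.countP (fun item => pvGet item "owner_status" == some "single_owner_plus_unowned") : Int)) := by
  have := pvCounts_go cvs 0 0 0 0
  simpa [pvCounts] using this

theorem filter_ne_iff {α : Type} (p : α → Bool) (xs : List α) :
    (xs.filter p ≠ []) ↔ (0 : Int) < (xs.countP p : Int) := by
  rw [List.countP_eq_length_filter]
  constructor
  · intro hne
    exact_mod_cast List.length_pos_iff.mpr hne
  · intro hpos hnil
    rw [hnil] at hpos
    simp at hpos

theorem filter_len_int {α : Type} (p : α → Bool) (xs : List α) :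
    ((xs.filter p).length : Int) = (xs.countP p : Int) := by
  rw [List.countP_eq_length_filter]

-- ===== VERDICT (by name: the statement is the Claim_ definition above) =====
theorem assess_scope_alignment_spec : Claim_equal_assess_scope_alignment := by
  intro scope owned cvs _
  unfold Spec_assess_scope_alignment assess_scope_alignment assess_scope_alignment_alt
  by_cases h0 : owned = []
  · simp [h0]
  by_cases h1 : cvs = []
  · simp [h0, h1]
  simp only [h0, h1, if_false]
  rw [pvCounts_eq]
  simp only [filter_ne_iff, filter_len_int]
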